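-- pv_equiv track=rewrite | github.com/atoiansk/advent-of-code | 2024/day_9/day_9.py | compact_data
-- ===== SOURCE A (Python) =====
-- def compact_data(memory):
--     move_index = 0
--
--     for i in reversed(range(len(memory))):
--         if memory[i] == '.':
--             continue;
--
--         while memory[move_index] != '.':
--             move_index += 1
--
--         if move_index >= i:
--             break;
--
--         memory[move_index] = memory[i]
--         memory[i] = '.'
--     return memory
-- ===== SOURCE B (Python) =====
-- def compact_data(memory):
--     vals = [c for c in memory if c != '.']
--     rvals = vals[::-1]
--     n = len(vals)
--     out = []
--     k = 0
--     for c in memory[:n]: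
--         if c == '.':
--             out.append(rvals[k])
--             k += 1
--         else:
--             out.append(c)
--     out.extend(['.'] * (len(memory) - n))
--     memory[:] = out
--     return memory
-- ===== Notes on version B (the rewrite author's own statement) =====
-- stated objective: alternative
-- what changed: A compacts by scanning from the back and repeatedly swapping the last value into the first free dot; B precomputes the list of values once and rebuilds the result in a single forward pass, keeping values in place in the first n slots, filling dots from the reversed value list, and padding the tail with dots.
import Mathlib
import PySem

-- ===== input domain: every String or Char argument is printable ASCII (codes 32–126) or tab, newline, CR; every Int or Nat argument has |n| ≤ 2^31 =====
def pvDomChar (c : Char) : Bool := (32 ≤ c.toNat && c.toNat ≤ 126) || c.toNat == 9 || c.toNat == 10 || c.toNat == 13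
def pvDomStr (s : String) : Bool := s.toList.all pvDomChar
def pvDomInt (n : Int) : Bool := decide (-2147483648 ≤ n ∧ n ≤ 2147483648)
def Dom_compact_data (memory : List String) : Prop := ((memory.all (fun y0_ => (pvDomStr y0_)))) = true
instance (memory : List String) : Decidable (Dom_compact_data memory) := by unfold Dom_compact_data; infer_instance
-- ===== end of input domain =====

-- B replaces A's back-to-front swap loop by one forward fill from a precomputed value
-- list (objective: alternative decomposition, same cost). Both Pythons mutate `memory`
-- in place and leave it equal to the returned list; the theorems are about the return value.

-- ===== PORT A =====

-- Python's inner `while memory[move_index] != '.'`: first index ≥ p holding ".";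
-- returns memory.length when the scan runs off the end (there Python raises IndexError,
-- excluded by Pre_).
def findDot (m : List String) (p : Nat) : Nat :=
  if h : p < m.length then
    if m[p] = "." then p else findDot m (p + 1)
  else p
termination_by m.length - p

-- `for i in reversed(range(len(memory)))` with persistent move_index and early break:
-- loopA i m p still has to process indices i-1, …, 0.
def loopA : Nat → List String → Nat → List String
  | 0, m, _ => m
  | i + 1, m, p =>
    if m.getD i "" = "." then loopA i m p
    else
      let p' := findDot m p
      if i ≤ p' then m
      else loopA i ((m.set p' (m.getD i "")).set i ".") p'

def compact_data (memory : List String) : List String :=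
  loopA memory.length memory 0

-- ===== PORT B =====

-- the `for c in memory[:n]` loop of Source B, carrying the counter k into rvals
def fillIdx (cells rvals : List String) (k : Nat) : List String :=
  match cells with
  | [] => []
  | c :: cs =>
    if c = "." then rvals.getD k "." :: fillIdx cs rvals (k + 1)
    else c :: fillIdx cs rvals k

def compact_data_alt (memory : List String) : List String :=
  let vals := memory.filter (fun c => c ≠ ".")
  let rvals := vals.reverse
  let n := vals.length
  fillIdx (memory.take n) rvals 0 ++ List.replicate (memory.length - n) "."

-- ===== PRECONDITION & SPEC =====
-- Pre_ excludes exactly the inputs on which A raises IndexError: a nonempty memory with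
-- no "." cell, where the inner while-scan runs past the end of the list.
def Pre_compact_data (memory : List String) : Prop :=
  memory = [] ∨ "." ∈ memory
instance (memory : List String) : Decidable (Pre_compact_data memory) := by
  unfold Pre_compact_data; infer_instance

def pvWitness_compact_data : List String := ["1", ".", ".", "2", "3", "."]

def Spec_compact_data (memory : List String) (out : List String) : Prop := out = compact_data_alt memory
instance (memory : List String) (out : List String) : Decidable (Spec_compact_data memory out) := by unfold Spec_compact_data; infer_instance

-- ===== CLAIM (what is proved, stated in full; the proofs are below) =====
def Claim_equal_compact_data : Prop := ∀ (memory : List String), Dom_compact_data memory → Pre_compact_data memory → Spec_compact_data memory (compact_data memory)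

-- ===== LEMMAS AND PROOFS =====

theorem findDot_not_dot (m : List String) (p j : Nat) (h1 : p ≤ j) (h2 : j < findDot m p) :
    ¬ (m.getD j "" = ".") := by
  fun_induction findDot m p with
  | case1 p h hd => omega
  | case2 p h hne ih =>
    rcases Nat.eq_or_lt_of_le h1 with rfl | hlt
    · simpa [List.getD, List.getElem?_eq_getElem h] using hne
    · exact ih (by omega) h2
  | case3 p h => omega

theorem findDot_dot (m : List String) (p : Nat) (h : findDot m p < m.length) :
    m.getD (findDot m p) "" = "." := by
  fun_induction findDot m p with
  | case1 p hlt hd => simpa [List.getD, List.getElem?_eq_getElem hlt] using hd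
  | case2 p hlt hne ih => exact ih h
  | case3 p hge => omega

theorem set_at_append (A B : List String) (x y : String) :
    (A ++ x :: B).set A.length y = A ++ y :: B := by
  induction A with
  | nil => simp
  | cons a A ih => simp [ih]

theorem fillIdx_vals_prefix (F rest r : List String) (k : Nat)
    (hF : ∀ s ∈ F, s ≠ ".") :
    fillIdx (F ++ rest) r k = F ++ fillIdx rest r k := by
  induction F with
  | nil => simp
  | cons a F ih =>
    have ha : a ≠ "." := hF a (by simp)
    simp only [List.cons_append, fillIdx, if_neg ha]
    rw [ih (fun s hs => hF s (by simp [hs]))]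

theorem fillIdx_shift (cells r : List String) (x : String) (k : Nat) :
    fillIdx cells (x :: r) (k + 1) = fillIdx cells r k := by
  induction cells generalizing k with
  | nil => simp [fillIdx]
  | cons c cs ih =>
    by_cases hc : c = "."
    · simp [fillIdx, hc, ih]
    · simp [fillIdx, hc, ih]

theorem fillIdx_congr (cells r1 r2 : List String) (k : Nat)
    (h : ∀ j, j < cells.count "." → r1.getD (k + j) "." = r2.getD (k + j) ".") :
    fillIdx cells r1 k = fillIdx cells r2 k := by
  induction cells generalizing k with
  | nil => simp [fillIdx]
  | cons c cs ih =>
    by_cases hc : c = "."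
    · subst hc
      have hcount : (("." : String) :: cs).count "." = cs.count "." + 1 := by
        simp [List.count_cons]
      have h0 := h 0 (by omega)
      simp only [fillIdx, if_pos rfl]
      rw [show k + 0 = k from rfl] at h0
      rw [if_pos trivial, if_pos trivial, h0, ih (k + 1) (fun j hj => by
        have := h (j + 1) (by omega)
        simpa [Nat.add_assoc, Nat.add_comm 1 j] using this)]
    · have hcount : (c :: cs).count "." = cs.count "." := by
        simp [List.count_cons, hc]
      simp only [fillIdx, if_neg hc]
      rw [ih k (fun j hj => h j (by omega))]

theorem alt_def (m : List String) :
    compact_data_alt m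
      = fillIdx (m.take (m.filter (fun c => c ≠ ".")).length)
          ((m.filter (fun c => c ≠ ".")).reverse) 0
        ++ List.replicate (m.length - (m.filter (fun c => c ≠ ".")).length) "." := rfl

-- a fully compacted list is a fixed point of compact_data_alt
theorem alt_fixed (vs : List String) (d : Nat) (hv : ∀ s ∈ vs, s ≠ ".") :
    compact_data_alt (vs ++ List.replicate d ".") = vs ++ List.replicate d "." := by
  rw [alt_def]
  have hfil : (vs ++ List.replicate d ".").filter (fun c => c ≠ ".") = vs := by
    rw [List.filter_append, List.filter_eq_self.mpr (by intro a ha; simpa using hv a ha),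
      List.filter_eq_nil_iff.mpr (by intro a ha; simp [List.eq_of_mem_replicate ha]),
      List.append_nil]
  simp only [hfil]
  have htake : (vs ++ List.replicate d ".").take vs.length = vs := List.take_left
  rw [htake]
  have hfill : fillIdx vs (vs.reverse) 0 = vs := by
    have := fillIdx_vals_prefix vs [] (vs.reverse) 0 hv
    simpa [fillIdx] using this
  rw [hfill]
  congr 1
  simp

-- one swap of A's loop does not change B's result
theorem alt_swap (F G D : List String) (v : String)
    (hF : ∀ s ∈ F, s ≠ ".") (hv : v ≠ ".") (hD : ∀ s ∈ D, s = ".") :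
    compact_data_alt (F ++ v :: G ++ "." :: D) = compact_data_alt (F ++ "." :: G ++ v :: D) := by
  rw [alt_def, alt_def]
  have hfa : List.filter (fun c => !decide (c = ".")) F = F :=
    List.filter_eq_self.mpr (by intro a ha; simp [hF a ha])
  have hfD : List.filter (fun c => !decide (c = ".")) D = [] :=
    List.filter_eq_nil_iff.mpr (by intro a ha; simp [hD a ha])
  have h1 : (F ++ v :: G ++ "." :: D).filter (fun c => c ≠ ".")
      = F ++ v :: G.filter (fun c => c ≠ ".") := by
    simp [List.filter_append, hfa, hfD, hv]
  have h2 : (F ++ "." :: G ++ v :: D).filter (fun c => c ≠ ".")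
      = F ++ (G.filter (fun c => c ≠ ".") ++ [v]) := by
    simp [List.filter_append, hfa, hfD, hv]
  rw [h1, h2]
  set Gf := G.filter (fun c => c ≠ ".") with hGfdef
  have hGfle : Gf.length ≤ G.length := List.length_filter_le _ _
  have hn1 : (F ++ v :: Gf).length = F.length + (Gf.length + 1) := by simp
  have hn2 : (F ++ (Gf ++ [v])).length = F.length + (Gf.length + 1) := by simp
  rw [hn1, hn2]
  have htgen : ∀ x : String, ∀ X : List String,
      (F ++ x :: G ++ X).take (F.length + (Gf.length + 1)) = F ++ x :: G.take Gf.length := by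
    intro x X
    rw [List.take_append,
      show F.length + (Gf.length + 1) - (F ++ x :: G).length = 0 by simp; omega,
      List.take_append,
      List.take_of_length_le (by omega : F.length ≤ F.length + (Gf.length + 1)),
      show F.length + (Gf.length + 1) - F.length = Gf.length + 1 by omega]
    simp
  have ht1 : (F ++ v :: G ++ "." :: D).take (F.length + (Gf.length + 1))
      = F ++ v :: G.take Gf.length := htgen v _
  have ht2 : (F ++ "." :: G ++ v :: D).take (F.length + (Gf.length + 1))
      = F ++ "." :: G.take Gf.length := htgen "." _
  rw [ht1, ht2]
  have hr1 : (F ++ v :: Gf).reverse = Gf.reverse ++ v :: F.reverse := by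
    simp
  have hr2 : (F ++ (Gf ++ [v])).reverse = v :: (Gf.reverse ++ F.reverse) := by
    simp
  rw [hr1, hr2]
  rw [fillIdx_vals_prefix F (v :: G.take Gf.length) _ 0 hF,
      fillIdx_vals_prefix F ("." :: G.take Gf.length) _ 0 hF]
  simp only [fillIdx, if_neg hv, if_pos rfl, List.getD_cons_zero]
  rw [fillIdx_shift]
  have hcongr : fillIdx (G.take Gf.length) (Gf.reverse ++ v :: F.reverse) 0
      = fillIdx (G.take Gf.length) (Gf.reverse ++ F.reverse) 0 := by
    apply fillIdx_congr
    intro j hj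
    have hjlt : j < Gf.reverse.length := by
      have h1 : (G.take Gf.length).count "." ≤ (G.take Gf.length).length :=
        List.count_le_length
      have h2 : (G.take Gf.length).length ≤ Gf.length := by
        simp [List.length_take]
      simp only [List.length_reverse]
      omega
    simp only [Nat.zero_add]
    rw [List.getD_append _ _ _ _ hjlt, List.getD_append _ _ _ _ hjlt]
  rw [hcongr]
  congr 2
  simp

theorem loopA_main : ∀ (i : Nat) (m : List String) (p : Nat),
    i ≤ m.length → p ≤ m.length →
    (∀ j, i ≤ j → j < m.length → m.getD j "" = ".") →
    (∀ j, j < p → ¬ (m.getD j "" = ".")) →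
    compact_data_alt (loopA i m p) = compact_data_alt m ∧
    ∃ vs d, loopA i m p = vs ++ List.replicate d "." ∧ ∀ s ∈ vs, s ≠ "." := by
  intro i
  induction i with
  | zero =>
    intro m p hi hp I1 I2
    refine ⟨rfl, [], m.length, ?_, by simp⟩
    have hall : ∀ b ∈ m, b = "." := by
      intro b hb
      obtain ⟨j, hj, rfl⟩ := List.mem_iff_getElem.mp hb
      have := I1 j (Nat.zero_le _) hj
      rwa [List.getD_eq_getElem m "" hj] at this
    simpa using List.eq_replicate_of_mem hall
  | succ i ih =>
    intro m p hi hp I1 I2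
    have hilen : i < m.length := by omega
    by_cases hdot : m.getD i "" = "."
    · -- memory[i] == '.': continue
      have hstep : loopA (i + 1) m p = loopA i m p := by
        simp only [loopA, if_pos hdot]
      rw [hstep]
      refine ih m p (by omega) hp ?_ I2
      intro j hj hj'
      rcases Nat.eq_or_lt_of_le hj with rfl | h
      · exact hdot
      · exact I1 j (by omega) hj'
    · by_cases hbr : i ≤ findDot m p
      · -- move_index >= i: break
        have hstep : loopA (i + 1) m p = m := by
          simp only [loopA, if_neg hdot, if_pos hbr]
        have hnodotlt : ∀ j, j < findDot m p → ¬ (m.getD j "" = ".") := by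
          intro j hj
          by_cases hjp : j < p
          · exact I2 j hjp
          · exact findDot_not_dot m p j (by omega) hj
        rw [hstep]
        refine ⟨rfl, m.take (i + 1), m.length - (i + 1), ?_, ?_⟩
        · conv_lhs => rw [← List.take_append_drop (i + 1) m]
          congr 1
          have hlen : (m.drop (i + 1)).length = m.length - (i + 1) := by simp
          have hall : ∀ b ∈ m.drop (i + 1), b = "." := by
            intro b hb
            obtain ⟨j, hj, rfl⟩ := List.mem_iff_getElem.mp hb
            rw [List.getElem_drop]
            have h2 : i + 1 + j < m.length := by simp at hj; omega
            have := I1 (i + 1 + j) (by omega) h2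
            rwa [List.getD_eq_getElem m "" h2] at this
          rw [← hlen]
          exact List.eq_replicate_of_mem hall
        · intro s hs heq
          obtain ⟨j, hj, hsj⟩ := List.mem_iff_getElem.mp hs
          rw [List.getElem_take] at hsj
          have hjb : j < i + 1 ∧ j < m.length := by
            simp [List.length_take] at hj; omega
          refine absurd heq ?_
          subst hsj
          rw [← List.getD_eq_getElem m "" hjb.2]
          rcases Nat.lt_or_ge j i with hji | hji
          · exact hnodotlt j (by omega)
          · have hje : j = i := by omega
            subst hje
            exact hdot
      · -- swap
        have hplt : findDot m p < i := by omega
        have hpln : findDot m p < m.length := by omega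
        have hstep : loopA (i + 1) m p
            = loopA i ((m.set (findDot m p) (m.getD i "")).set i ".") (findDot m p) := by
          simp only [loopA, if_neg hdot, if_neg hbr]
        have hnodotlt : ∀ j, j < findDot m p → ¬ (m.getD j "" = ".") := by
          intro j hj
          by_cases hjp : j < p
          · exact I2 j hjp
          · exact findDot_not_dot m p j (by omega) hj
        have hpdot : m.getD (findDot m p) "" = "." := findDot_dot m p hpln
        set p' := findDot m p with hp'def
        obtain ⟨v, hvdef⟩ : ∃ x, x = m.getD i "" := ⟨_, rfl⟩
        obtain ⟨F, hFdef⟩ : ∃ x, x = m.take p' := ⟨_, rfl⟩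
        obtain ⟨G, hGdef⟩ : ∃ x, x = (m.drop (p' + 1)).take (i - (p' + 1)) := ⟨_, rfl⟩
        obtain ⟨D, hDdef⟩ : ∃ x, x = m.drop (i + 1) := ⟨_, rfl⟩
        rw [← hvdef] at hstep
        have hFlen : F.length = p' := by rw [hFdef]; simp [List.length_take]; omega
        have hGlen : G.length = i - (p' + 1) := by rw [hGdef]; simp [List.length_take]; omega
        have hvne : v ≠ "." := by rw [hvdef]; exact hdot
        have hm : m = F ++ "." :: (G ++ v :: D) := by
          conv_lhs => rw [← List.take_append_drop p' m]
          rw [← hFdef]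
          congr 1
          rw [List.drop_eq_getElem_cons hpln,
            show m[p'] = "." by rw [← List.getD_eq_getElem m "" hpln]; exact hpdot]
          congr 1
          conv_lhs => rw [← List.take_append_drop (i - (p' + 1)) (m.drop (p' + 1))]
          rw [← hGdef]
          congr 1
          rw [List.drop_drop, show p' + 1 + (i - (p' + 1)) = i by omega,
            List.drop_eq_getElem_cons hilen,
            show m[i] = v by rw [← List.getD_eq_getElem m "" hilen]; exact hvdef.symm,
            ← hDdef]
        have hm' : (m.set p' v).set i "." = F ++ v :: (G ++ "." :: D) := by
          conv_lhs => rw [hm]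
          have e1 : (F ++ "." :: (G ++ v :: D)).set p' v = F ++ v :: (G ++ v :: D) := by
            rw [← hFlen]; exact set_at_append F (G ++ v :: D) "." v
          rw [e1, show F ++ v :: (G ++ v :: D) = (F ++ v :: G) ++ v :: D by simp,
            show i = (F ++ v :: G).length by
              simp only [List.length_append, List.length_cons, hFlen, hGlen]; omega,
            set_at_append (F ++ v :: G) D v "."]
          simp
        have hFnd : ∀ s ∈ F, s ≠ "." := by
          intro s hs heq
          obtain ⟨j, hj, hsj⟩ := List.mem_iff_getElem.mp hs
          have hjp : j < p' := by rwa [hFlen] at hj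
          have h1 : F.getD j "" = s := by rw [List.getD_eq_getElem F "" hj, hsj]
          have h2 : F.getD j "" = m.getD j "" := by
            rw [hFdef]; simp [List.getD, hjp]
          exact hnodotlt j hjp (by rw [← h2, h1, heq])
        have hDd : ∀ s ∈ D, s = "." := by
          intro s hs
          obtain ⟨j, hj, hsj⟩ := List.mem_iff_getElem.mp hs
          have hjl : i + 1 + j < m.length := by
            rw [hDdef] at hj; simp at hj; omega
          have h1 : D.getD j "" = s := by rw [List.getD_eq_getElem D "" hj, hsj]
          have h2 : D.getD j "" = m.getD (i + 1 + j) "" := by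
            rw [hDdef]; simp [List.getD, List.getElem?_drop]
          rw [← h1, h2]
          exact I1 (i + 1 + j) (by omega) hjl
        have I1' : ∀ j, i ≤ j → j < ((m.set p' v).set i ".").length →
            ((m.set p' v).set i ".").getD j "" = "." := by
          intro j hj hj'
          simp only [List.length_set] at hj'
          rcases Nat.eq_or_lt_of_le hj with rfl | hlt
          · simp [List.getD, List.getElem?_set_self (by simp [List.length_set]; omega : i < (m.set p' v).length)]
          · rw [show ((m.set p' v).set i ".").getD j "" = m.getD j "" by
              simp [List.getD, List.getElem?_set_ne (by omega : i ≠ j),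
                List.getElem?_set_ne (by omega : p' ≠ j)]]
            exact I1 j (by omega) hj'
        have I2' : ∀ j, j < p' → ¬ ((m.set p' v).set i ".").getD j "" = "." := by
          intro j hj
          rw [show ((m.set p' v).set i ".").getD j "" = m.getD j "" by
            simp [List.getD, List.getElem?_set_ne (by omega : i ≠ j),
              List.getElem?_set_ne (by omega : p' ≠ j)]]
          exact hnodotlt j hj
        obtain ⟨e1, vs, d, e2, e3⟩ :=
          ih ((m.set p' v).set i ".") p' (by simp; omega) (by simp; omega) I1' I2'
        refine ⟨?_, vs, d, by rw [hstep]; exact e2, e3⟩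
        rw [hstep, e1]
        calc compact_data_alt ((m.set p' v).set i ".")
            = compact_data_alt (F ++ v :: (G ++ "." :: D)) := by rw [hm']
          _ = compact_data_alt (F ++ "." :: (G ++ v :: D)) := by
                have e := alt_swap F G D v hFnd hvne hDd
                rw [show F ++ v :: G ++ "." :: D = F ++ v :: (G ++ "." :: D) by simp,
                  show F ++ "." :: G ++ v :: D = F ++ "." :: (G ++ v :: D) by simp] at e
                exact e
          _ = compact_data_alt m := by rw [← hm]

-- ===== VERDICT (by name: the statement is the Claim_ definition above) =====
theorem compact_data_spec : Claim_equal_compact_data := by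
  intro memory _ _
  unfold Spec_compact_data compact_data
  obtain ⟨h1, vs, d, h2, h3⟩ :=
    loopA_main memory.length memory 0 le_rfl (Nat.zero_le _)
      (fun j hj hj' => absurd hj' (by omega)) (fun j hj => absurd hj (by omega))
  calc loopA memory.length memory 0 = vs ++ List.replicate d "." := h2
    _ = compact_data_alt (vs ++ List.replicate d ".") := (alt_fixed vs d h3).symm
    _ = compact_data_alt (loopA memory.length memory 0) := by rw [h2]
    _ = compact_data_alt memory := h1
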